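-- pv_equiv track=rewrite | github.com/Samuelagga/A00816565_A4.2 | convertNumbers.py | find_max_bit
-- ===== SOURCE A (Python) =====
-- def find_max_bit(data):
--     """
--     Find maximum number of bits that will be needed for conversions.
--     Use this maximum for all values.
--     """
--     max_abs = 0
--     number_bits = 1
--     for number in data:
--         abs_value = abs(number)
--         if abs_value > max_abs:
--             max_abs = abs_value
--     max_bit = 1
--     while max_bit < max_abs + 1:
--         max_bit *= 2
--         number_bits = number_bits +1
--     max_rem = number_bits % 4
--     if max_rem == 0:
--         return number_bits
--     max_bits = number_bits + (4 - max_rem)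
--     return max_bits
-- ===== SOURCE B (Python) =====
-- def find_max_bit(data):
--     max_abs = max((abs(x) for x in data), default=0)
--     number_bits = max_abs.bit_length() + 1
--     return number_bits + (-number_bits) % 4
-- ===== Notes on version B (the rewrite author's own statement) =====
-- stated objective: simpler
-- what changed: Replaces the doubling while-loop with a closed-form bit count (max_abs.bit_length() + 1) and replaces the two-branch padding with the single expression n + (-n) % 4; the max is taken in one generator pass.
import Mathlib
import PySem

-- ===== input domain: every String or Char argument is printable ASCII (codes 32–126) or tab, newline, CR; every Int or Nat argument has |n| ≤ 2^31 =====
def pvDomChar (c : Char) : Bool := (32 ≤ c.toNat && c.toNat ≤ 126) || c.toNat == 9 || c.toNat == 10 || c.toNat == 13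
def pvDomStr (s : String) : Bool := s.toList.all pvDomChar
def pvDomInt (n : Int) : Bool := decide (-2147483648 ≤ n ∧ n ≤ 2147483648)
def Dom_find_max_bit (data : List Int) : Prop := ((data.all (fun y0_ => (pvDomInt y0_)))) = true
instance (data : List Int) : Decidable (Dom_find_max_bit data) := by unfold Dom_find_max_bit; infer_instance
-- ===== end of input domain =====

-- B replaces A's doubling while-loop by a closed-form bit_length computation and the
-- two-branch padding by a single modulo expression (objective: simpler).

-- ===== PORT A =====
-- the while-loop of A; h is the loop invariant 1 ≤ max_bit needed for termination
def find_max_bit_loop (max_abs max_bit number_bits : Int) (h : 1 ≤ max_bit) : Int :=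
  if hc : max_bit < max_abs + 1 then
    find_max_bit_loop max_abs (max_bit * 2) (number_bits + 1) (by omega)
  else
    number_bits
termination_by (max_abs + 1 - max_bit).toNat
decreasing_by omega

def find_max_bit (data : List Int) : Int :=
  let max_abs := data.foldl (fun m number =>
    let abs_value := |number|
    if abs_value > m then abs_value else m) 0
  let number_bits := find_max_bit_loop max_abs 1 1 (by omega)
  let max_rem := PySem.Int.mod number_bits 4
  if max_rem = 0 then number_bits
  else number_bits + (4 - max_rem)

-- ===== PORT B =====
def find_max_bit_alt (data : List Int) : Int :=
  let max_abs := data.foldl (fun m x => max m |x|) 0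
  let number_bits : Int := (Nat.size max_abs.toNat : Int) + 1
  number_bits + PySem.Int.mod (-number_bits) 4

-- ===== PRECONDITION & SPEC =====
def Spec_find_max_bit (data : List Int) (out : Int) : Prop := out = find_max_bit_alt data
instance (data : List Int) (out : Int) : Decidable (Spec_find_max_bit data out) := by unfold Spec_find_max_bit; infer_instance

-- ===== CLAIM (what is proved, stated in full; the proofs are below) =====
def Claim_equal_find_max_bit : Prop := ∀ (data : List Int), Dom_find_max_bit data → Spec_find_max_bit data (find_max_bit data)

-- ===== LEMMAS AND PROOFS =====

-- the two folds compute the same maximum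
theorem pv_fold_eq (data : List Int) :
    data.foldl (fun m number =>
      let abs_value := |number|
      if abs_value > m then abs_value else m) 0
    = data.foldl (fun m x => max m |x|) 0 := by
  have : (fun (m number : Int) =>
      let abs_value := |number|
      if abs_value > m then abs_value else m) = (fun m x => max m |x|) := by
    funext m x
    simp only [max_def]
    split_ifs <;> omega
  rw [this]

theorem pv_fold_nonneg (data : List Int) (init : Int) (h : 0 ≤ init) :
    0 ≤ data.foldl (fun m x => max m |x|) init := by
  induction data generalizing init with
  | nil => simpa
  | cons a t ih => exact ih _ (le_trans h (le_max_left _ _))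

theorem pv_loop_congr (a b b' k : Int) (h : 1 ≤ b) (h' : 1 ≤ b') (e : b = b') :
    find_max_bit_loop a b k h = find_max_bit_loop a b' k h' := by subst e; rfl

-- the loop counts doublings: starting at 2^j it adds (size n - j) steps
theorem pv_loop_eq (n : ℕ) : ∀ (d j : ℕ) (k : Int), Nat.size n ≤ j + d →
    find_max_bit_loop (n : Int) ((2 : Int) ^ j) k (one_le_pow₀ (by norm_num)) = k + ((Nat.size n - j : ℕ) : Int) := by
  intro d
  induction d with
  | zero =>
    intro j k hj
    rw [find_max_bit_loop]
    have hn : n < 2 ^ j := Nat.size_le.mp (by omega)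
    have h2 : ¬ ((2 : Int) ^ j < (n : Int) + 1) := by
      have h' : ((n : Int)) < (((2 ^ j : ℕ)) : Int) := by exact_mod_cast hn
      push_cast at h'
      omega
    simp only [h2, dite_false]
    have : Nat.size n - j = 0 := by omega
    simp [this]
  | succ d ih =>
    intro j k hj
    by_cases hlt : (2 : Int) ^ j < (n : Int) + 1
    · rw [find_max_bit_loop]
      simp only [hlt, dite_true]
      have h2 : (2 : Int) ^ j * 2 = (2 : Int) ^ (j + 1) := by ring
      have hjlt : j < Nat.size n := by
        rw [Nat.lt_size]
        have h' : (((2 ^ j : ℕ)) : Int) ≤ (n : Int) := by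
          push_cast
          omega
        exact_mod_cast h'
      rw [pv_loop_congr _ _ _ _ _ (one_le_pow₀ (by norm_num)) h2,
        ih (j + 1) (k + 1) (by omega)]
      have : Nat.size n - j = (Nat.size n - (j + 1)) + 1 := by omega
      rw [this]
      push_cast
      ring
    · rw [find_max_bit_loop]
      simp only [hlt, dite_false]
      have hle : Nat.size n ≤ j := by
        rw [Nat.size_le]
        have h' : (n : Int) < (((2 ^ j : ℕ)) : Int) := by
          push_cast
          omega
        exact_mod_cast h'
      have : Nat.size n - j = 0 := by omega
      simp [this]

theorem pv_loop_main (n : ℕ) :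
    find_max_bit_loop (n : Int) 1 1 (by omega) = (Nat.size n : Int) + 1 := by
  have h := pv_loop_eq n (Nat.size n) 0 1 (by omega)
  simpa [add_comm] using h

-- ===== VERDICT (by name: the statement is the Claim_ definition above) =====
theorem find_max_bit_spec : Claim_equal_find_max_bit := by
  intro data _
  unfold Spec_find_max_bit find_max_bit find_max_bit_alt
  simp only []
  rw [pv_fold_eq]
  set m := data.foldl (fun m x => max m |x|) 0 with hm
  have hm0 : 0 ≤ m := pv_fold_nonneg data 0 le_rfl
  have hcast : ((m.toNat : ℕ) : Int) = m := Int.toNat_of_nonneg hm0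
  have hloop : find_max_bit_loop m 1 1 (by omega) = (Nat.size m.toNat : Int) + 1 := by
    rw [← hcast]
    exact pv_loop_main m.toNat
  rw [hloop]
  set n : Int := (Nat.size m.toNat : Int) + 1 with hn
  have hn1 : 1 ≤ n := by omega
  have h4 : (0:Int) < 4 := by norm_num
  have h1 : PySem.Int.mod n 4 = n % 4 := PySem.Int.mod_eq_emod_of_pos h4
  have h2 : PySem.Int.mod (-n) 4 = (-n) % 4 := PySem.Int.mod_eq_emod_of_pos h4
  rw [h1, h2]
  split_ifs with h <;> omega
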